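-- pv_equiv track=rewrite | github.com/blender-nlp/mCLM | mCLM/data/upload_to_hf.py | replace_ends
-- ===== SOURCE A (Python) =====
-- def replace_ends(mol_list):
--
--     new_mol_list = []
--     for mol in mol_list:
--         new_react = []
--         for mo in mol.split('.'):
--
--             split = mo.split('^')
--             new_mol = []
--             for m in split:
--                 if ('[1*]' in m) and (not '[2*]' in m): new_mol.append(m.replace('[1*]', '[3*]'))
--                 elif (not '[1*]' in m) and ('[2*]' in m): new_mol.append(m.replace('[2*]', '[3*]'))
--                 else: new_mol.append(m)
--
--             new_react.append('^'.join(new_mol))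
--         new_mol_list.append('.'.join(new_react))
--
--     return new_mol_list
-- ===== SOURCE B (Python) =====
-- # Single left-to-right tokenizer pass per molecule: lex delimiters and [1*]/[2*]
-- # markers as tokens, track which marker kinds the current fragment contains, and
-- # render each fragment from its token list (marker digit -> '3' when exactly one
-- # kind occurs). No split/join on delimiters, no substring search, no str.replace.
--
-- def _step(s, i):
--     c = s[i]
--     if c == '.' or c == '^':
--         return ('d', c, i + 1)
--     if s[i:i + 4] == '[1*]':
--         return ('m', '1', i + 4)
--     if s[i:i + 4] == '[2*]':
--         return ('m', '2', i + 4)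
--     return ('c', c, i + 1)
--
--
-- def _render(toks, only):
--     return ''.join(v if k == 'c' else ('[3*]' if only else '[' + v + '*]')
--                    for k, v in toks)
--
--
-- def replace_ends(mol_list):
--     result = []
--     for mol in mol_list:
--         out = []
--         toks = []
--         saw1 = saw2 = False
--         i = 0
--         n = len(mol)
--         while i < n:
--             kind, v, i = _step(mol, i)
--             if kind == 'd':
--                 out.append(_render(toks, saw1 != saw2))
--                 out.append(v)
--                 toks = []
--                 saw1 = saw2 = False
--             else:
--                 toks.append((kind, v))
--                 if kind == 'm':
--                     if v == '1':
--                         saw1 = True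
--                     else:
--                         saw2 = True
--         out.append(_render(toks, saw1 != saw2))
--         result.append(''.join(out))
--     return result
-- ===== Notes on version B (the rewrite author's own statement) =====
-- stated objective: alternative
-- what changed: Replaces A's nested split-on-'.'/split-on-'^' with membership tests and str.replace per fragment by a single left-to-right tokenizer pass per molecule that lexes delimiters and [1*]/[2*] markers as tokens, tracks which marker kinds the current fragment saw, and renders each fragment from its token list.
import Mathlib
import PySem

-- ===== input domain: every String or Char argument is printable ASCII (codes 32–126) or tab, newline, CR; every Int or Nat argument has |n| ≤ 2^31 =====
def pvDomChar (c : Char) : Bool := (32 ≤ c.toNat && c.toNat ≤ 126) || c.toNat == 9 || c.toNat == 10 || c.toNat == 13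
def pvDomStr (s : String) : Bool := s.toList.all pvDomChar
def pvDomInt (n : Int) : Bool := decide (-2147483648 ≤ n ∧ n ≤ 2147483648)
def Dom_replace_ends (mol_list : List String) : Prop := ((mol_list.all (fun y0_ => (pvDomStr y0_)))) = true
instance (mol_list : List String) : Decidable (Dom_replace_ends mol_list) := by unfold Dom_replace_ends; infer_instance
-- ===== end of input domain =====

-- B rewrites each molecule in one left-to-right tokenizer pass (delimiters and [1*]/[2*]
-- markers lexed as tokens, fragments rendered from their token lists) instead of A's
-- nested split-on-'.'/'^' with per-fragment membership tests and str.replace; same values.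

-- ===== PORT A =====
def replace_ends (mol_list : List String) : List String :=
  mol_list.foldl (fun new_mol_list mol =>
    let new_react : List String :=
      -- mol.split('.'): '.' is a nonempty literal separator, so split? is always `some`
      ((PySem.Str.split? mol ".").getD []).foldl (fun new_react mo =>
        let split := (PySem.Str.split? mo "^").getD []
        let new_mol : List String := split.foldl (fun new_mol m =>
          if PySem.Str.isIn "[1*]" m && !(PySem.Str.isIn "[2*]" m) then
            new_mol ++ [PySem.Str.replace m "[1*]" "[3*]"]
          else if !(PySem.Str.isIn "[1*]" m) && PySem.Str.isIn "[2*]" m then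
            new_mol ++ [PySem.Str.replace m "[2*]" "[3*]"]
          else new_mol ++ [m]) []
        new_react ++ [PySem.Str.join "^" new_mol]) []
    new_mol_list ++ [PySem.Str.join "." new_react]) []

-- ===== PORT B =====
-- token of B's lexer: a plain character or a marker "[v*]" with digit v
inductive PvTok
  | c : Char → PvTok
  | m : Char → PvTok
deriving DecidableEq, Repr

-- result of B's _step: end of string, a delimiter, or one token plus the rest
inductive PvStep
  | done
  | delim : Char → List Char → PvStep
  | tok : PvTok → List Char → PvStep
deriving DecidableEq, Repr

-- Source B's _step(s, i): the slice test s[i:i+4] == '[1*]' is the take-4 comparison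
def pvStep : List Char → PvStep
  | [] => .done
  | ch :: r =>
    if ch = '.' ∨ ch = '^' then .delim ch r
    else if (ch :: r).take 4 = ['[', '1', '*', ']'] then .tok (.m '1') (r.drop 3)
    else if (ch :: r).take 4 = ['[', '2', '*', ']'] then .tok (.m '2') (r.drop 3)
    else .tok (.c ch) r

-- termination facts for the scan loop (cited by decreasing_by)
theorem pvStep_delim_length {cs : List Char} {d : Char} {r : List Char}
    (h : pvStep cs = .delim d r) : r.length < cs.length := by
  cases cs with
  | nil => simp [pvStep] at h
  | cons ch t =>
    simp only [pvStep] at h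
    split_ifs at h <;> simp_all

theorem pvStep_tok_length {cs : List Char} {t : PvTok} {r : List Char}
    (h : pvStep cs = .tok t r) : r.length < cs.length := by
  cases cs with
  | nil => simp [pvStep] at h
  | cons ch tl =>
    simp only [pvStep] at h
    split_ifs at h <;> cases h <;> simp <;> omega

-- Source B's _render(toks, only)
def pvRender (toks : List PvTok) (only : Bool) : List Char :=
  toks.flatMap fun t => match t with
    | .c ch => [ch]
    | .m v => if only then ['[', '3', '*', ']'] else ['[', v, '*', ']']

-- Source B's while loop over one molecule: state = fragment tokens + saw1/saw2 flags
def pvScan (cs : List Char) (toks : List PvTok) (saw1 saw2 : Bool) : List Char :=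
  match h : pvStep cs with
  | .done => pvRender toks (saw1 != saw2)
  | .delim d r => pvRender toks (saw1 != saw2) ++ d :: pvScan r [] false false
  | .tok t r => pvScan r (toks ++ [t]) (saw1 || (t == .m '1')) (saw2 || (t == .m '2'))
termination_by cs.length
decreasing_by
  · exact pvStep_delim_length h
  · exact pvStep_tok_length h

def replace_ends_alt (mol_list : List String) : List String :=
  mol_list.foldl (fun result mol =>
    result ++ [String.ofList (pvScan mol.toList [] false false)]) []

-- ===== PRECONDITION & SPEC =====
def Spec_replace_ends (mol_list : List String) (out : List String) : Prop := out = replace_ends_alt mol_list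
instance (mol_list : List String) (out : List String) : Decidable (Spec_replace_ends mol_list out) := by unfold Spec_replace_ends; infer_instance

-- ===== CLAIM (what is proved, stated in full; the proofs are below) =====
def Claim_equal_replace_ends : Prop := ∀ (mol_list : List String), Dom_replace_ends mol_list → Spec_replace_ends mol_list (replace_ends mol_list)

-- ===== LEMMAS AND PROOFS =====

def pvNonDelim (c : Char) : Bool := !(c == '.' || c == '^')

-- tokens of the fragment starting the string (B's lexer, stopping at a delimiter)
def pvTokenize (cs : List Char) : List PvTok :=
  match h : pvStep cs with
  | .done => []
  | .delim _ _ => []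
  | .tok t r => t :: pvTokenize r
termination_by cs.length
decreasing_by exact pvStep_tok_length h

-- the remainder of the string starting at its first delimiter
def pvRestOf (cs : List Char) : List Char :=
  match h : pvStep cs with
  | .done => []
  | .delim d r => d :: r
  | .tok _ r => pvRestOf r
termination_by cs.length
decreasing_by exact pvStep_tok_length h

def pvHas1 (toks : List PvTok) : Bool := toks.any (· == PvTok.m '1')
def pvHas2 (toks : List PvTok) : Bool := toks.any (· == PvTok.m '2')

def pvTail (r : List Char) : List Char :=
  match r with
  | [] => []
  | d :: rest => d :: pvScan rest [] false false

-- clean model of Chars.splitOn on a single-character separator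
def pvSos (d : Char) : List Char → List (List Char)
  | [] => [[]]
  | c :: rest => if c = d then [] :: pvSos d rest else (pvSos d rest).modifyHead (c :: ·)

-- clean model of Chars.replace with nonempty pattern o :: os
def pvRep (o : Char) (os new : List Char) : List Char → List Char
  | [] => []
  | c :: t =>
    if (o :: os).isPrefixOf (c :: t) then new ++ pvRep o os new (t.drop os.length)
    else c :: pvRep o os new t
termination_by l => l.length
decreasing_by all_goals simp [List.length_drop] <;> omega

-- A's per-fragment branch, on char lists
def pvFixA (m : List Char) : List Char :=
  if PySem.Chars.isIn ['[','1','*',']'] m && !(PySem.Chars.isIn ['[','2','*',']'] m) then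
    PySem.Chars.replace m ['[','1','*',']'] ['[','3','*',']']
  else if !(PySem.Chars.isIn ['[','1','*',']'] m) && PySem.Chars.isIn ['[','2','*',']'] m then
    PySem.Chars.replace m ['[','2','*',']'] ['[','3','*',']']
  else m

-- A's whole per-molecule computation, on char lists
def pvA1 (cs : List Char) : List Char :=
  PySem.Chars.join ['.'] ((pvSos '.' cs).map (fun mo =>
    PySem.Chars.join ['^'] ((pvSos '^' mo).map pvFixA)))

-- ---- fuel elimination for splitOn and replace ----

theorem pvSos_ne_nil' (d : Char) (l : List Char) : pvSos d l ≠ [] := by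
  induction l with
  | nil => simp [pvSos]
  | cons c r ih =>
    simp only [pvSos]
    split
    · simp
    · cases h : pvSos d r with
      | nil => exact absurd h ih
      | cons p ps => simp

theorem pv_splitOn_go (d : Char) :
    ∀ (fuel : Nat) (l cur : List Char) (acc : List (List Char)), l.length ≤ fuel →
      PySem.Chars.splitOn.go [d] fuel l cur acc
        = acc.reverse ++ (pvSos d l).modifyHead (cur.reverse ++ ·) := by
  intro fuel
  induction fuel with
  | zero =>
    intro l cur acc h
    have hl : l = [] := by cases l <;> simp_all
    subst hl
    simp [PySem.Chars.splitOn.go, pvSos]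
  | succ n ih =>
    intro l cur acc h
    cases l with
    | nil => simp [PySem.Chars.splitOn.go, pvSos]
    | cons c rest =>
      rw [PySem.Chars.splitOn.go]
      simp only [List.isPrefixOf, Bool.and_true, List.length_cons, List.length_nil,
        List.drop_succ_cons, List.drop_zero]
      obtain ⟨p, ps, hps⟩ : ∃ p ps, pvSos d rest = p :: ps := by
        cases hx : pvSos d rest with
        | nil => exact absurd hx (pvSos_ne_nil' d rest)
        | cons p ps => exact ⟨p, ps, rfl⟩
      by_cases hdc : d == c
      · rw [if_pos hdc]
        rw [ih rest [] (cur.reverse :: acc) (by simpa using h)]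
        have hcd : c = d := (beq_iff_eq.mp hdc).symm
        simp only [pvSos, if_pos hcd, hps, List.modifyHead_cons, List.reverse_cons,
          List.reverse_nil, List.nil_append, List.reverse_append, List.reverse_reverse]
        simp
      · rw [if_neg hdc]
        rw [ih rest (c :: cur) acc (by simpa using h)]
        have hcd : ¬ c = d := fun e => hdc (by simp [e])
        simp only [pvSos, if_neg hcd, hps, List.modifyHead_cons, List.reverse_cons]
        simp

theorem pv_splitOn (s : List Char) (d : Char) :
    PySem.Chars.splitOn s [d] = pvSos d s := by
  unfold PySem.Chars.splitOn
  rw [pv_splitOn_go d (s.length + 1) s [] [] (by omega)]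
  obtain ⟨p, ps, hps⟩ : ∃ p ps, pvSos d s = p :: ps := by
    cases hx : pvSos d s with
    | nil => exact absurd hx (pvSos_ne_nil' d s)
    | cons p ps => exact ⟨p, ps, rfl⟩
  simp [hps]

theorem pv_replace_go (o : Char) (os new : List Char) :
    ∀ (fuel : Nat) (l acc : List Char), l.length ≤ fuel →
      PySem.Chars.replace.go (o :: os) new fuel l acc = acc.reverse ++ pvRep o os new l := by
  intro fuel
  induction fuel with
  | zero =>
    intro l acc h
    have hl : l = [] := by cases l <;> simp_all
    subst hl
    simp [PySem.Chars.replace.go, pvRep]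
  | succ n ih =>
    intro l acc h
    cases l with
    | nil => simp [PySem.Chars.replace.go, pvRep]
    | cons c t =>
      rw [PySem.Chars.replace.go]
      by_cases hp : (o :: os).isPrefixOf (c :: t)
      · rw [if_pos hp]
        rw [ih (List.drop (o :: os).length (c :: t)) (new.reverse ++ acc)
          (by simp only [List.length_drop, List.length_cons] at h ⊢; omega)]
        rw [pvRep, if_pos hp]
        simp [List.drop_succ_cons]
      · rw [if_neg hp]
        rw [ih t (c :: acc) (by simpa using h)]
        rw [pvRep, if_neg hp]
        simp

theorem pv_replace (s : List Char) (o : Char) (os new : List Char) :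
    PySem.Chars.replace s (o :: os) new = pvRep o os new s := by
  unfold PySem.Chars.replace
  rw [if_neg (by simp)]
  rw [pv_replace_go o os new s.length s [] (le_refl _)]
  simp

-- ---- structure of pvStep ----

theorem pv_take4_cons (a b c d : Char) (r : List Char) :
    (a :: b :: c :: d :: r).take 4 = [a, b, c, d] := rfl

theorem pv_take4_iff {cs : List Char} {a b c d : Char} :
    cs.take 4 = [a, b, c, d] ↔ ∃ r, cs = a :: b :: c :: d :: r := by
  constructor
  · intro h
    rcases cs with _ | ⟨x, _ | ⟨y, _ | ⟨z, _ | ⟨w, r⟩⟩⟩⟩ <;> simp_all [List.take]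
  · rintro ⟨r, rfl⟩
    exact pv_take4_cons a b c d r

theorem pvStep_done_iff {cs : List Char} : pvStep cs = .done ↔ cs = [] := by
  cases cs with
  | nil => simp [pvStep]
  | cons ch t =>
    simp only [pvStep]
    split_ifs <;> simp

theorem pvStep_delim_spec {cs : List Char} {d : Char} {r : List Char}
    (h : pvStep cs = .delim d r) : cs = d :: r ∧ pvNonDelim d = false := by
  cases cs with
  | nil => simp [pvStep] at h
  | cons ch t =>
    simp only [pvStep] at h
    split_ifs at h with h1 h2 h3
    obtain ⟨e1, e2⟩ : ch = d ∧ t = r := by injection h with a b; exact ⟨a, b⟩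
    subst e1; subst e2
    exact ⟨rfl, by rcases h1 with rfl | rfl <;> decide⟩

theorem pvStep_tok_m_spec {cs : List Char} {v : Char} {r : List Char}
    (h : pvStep cs = .tok (.m v) r) :
    cs = '[' :: v :: '*' :: ']' :: r ∧ (v = '1' ∨ v = '2') := by
  cases cs with
  | nil => simp [pvStep] at h
  | cons ch t =>
    simp only [pvStep] at h
    split_ifs at h with h1 h2 h3
    · obtain ⟨r', hr'⟩ := pv_take4_iff.mp h2
      obtain ⟨e1, e2⟩ : ch = '[' ∧ t = '1' :: '*' :: ']' :: r' := by
        injection hr' with a b; exact ⟨a, b⟩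
      subst e1; subst e2
      obtain ⟨ev, er⟩ : PvTok.m '1' = PvTok.m v ∧ List.drop 3 ('1' :: '*' :: ']' :: r') = r := by
        injection h with a b; exact ⟨a, b⟩
      obtain rfl : v = '1' := by injection ev with a; exact a.symm
      obtain rfl : r' = r := by simpa using er
      exact ⟨rfl, Or.inl rfl⟩
    · obtain ⟨r', hr'⟩ := pv_take4_iff.mp h3
      obtain ⟨e1, e2⟩ : ch = '[' ∧ t = '2' :: '*' :: ']' :: r' := by
        injection hr' with a b; exact ⟨a, b⟩
      subst e1; subst e2
      obtain ⟨ev, er⟩ : PvTok.m '2' = PvTok.m v ∧ List.drop 3 ('2' :: '*' :: ']' :: r') = r := by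
        injection h with a b; exact ⟨a, b⟩
      obtain rfl : v = '2' := by injection ev with a; exact a.symm
      obtain rfl : r' = r := by simpa using er
      exact ⟨rfl, Or.inr rfl⟩
    · exact absurd h (by simp)


theorem pvStep_tok_c_spec {cs : List Char} {ch : Char} {r : List Char}
    (h : pvStep cs = .tok (.c ch) r) :
    cs = ch :: r ∧ pvNonDelim ch = true ∧
      cs.take 4 ≠ ['[', '1', '*', ']'] ∧ cs.take 4 ≠ ['[', '2', '*', ']'] := by
  cases cs with
  | nil => simp [pvStep] at h
  | cons ch' t =>
    simp only [pvStep] at h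
    split_ifs at h with h1 h2 h3 <;>
      simp only [PvStep.tok.injEq, PvTok.c.injEq, reduceCtorEq, false_and, and_false] at h
    obtain ⟨e1, rfl⟩ := h
    subst e1
    have hnd : pvNonDelim ch' = true := by
      simp only [pvNonDelim, Bool.not_eq_true', Bool.or_eq_false_iff, beq_eq_false_iff_ne,
        ne_eq]
      exact not_or.mp h1
    exact ⟨rfl, hnd, h2, h3⟩

-- unfolding lemmas for the recursive scanners
theorem pvScan_done {cs : List Char} {toks : List PvTok} {s1 s2 : Bool}
    (h : pvStep cs = .done) : pvScan cs toks s1 s2 = pvRender toks (s1 != s2) := by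
  rw [pvScan.eq_def]; split <;> simp_all

theorem pvScan_delim {cs : List Char} {toks : List PvTok} {s1 s2 : Bool} {d : Char}
    {r : List Char} (h : pvStep cs = .delim d r) :
    pvScan cs toks s1 s2 = pvRender toks (s1 != s2) ++ d :: pvScan r [] false false := by
  rw [pvScan.eq_def]; split <;> simp_all

theorem pvScan_tok {cs : List Char} {toks : List PvTok} {s1 s2 : Bool} {t : PvTok}
    {r : List Char} (h : pvStep cs = .tok t r) :
    pvScan cs toks s1 s2
      = pvScan r (toks ++ [t]) (s1 || (t == .m '1')) (s2 || (t == .m '2')) := by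
  rw [pvScan.eq_def]; split <;> simp_all

theorem pvTokenize_done {cs : List Char} (h : pvStep cs = .done) : pvTokenize cs = [] := by
  rw [pvTokenize.eq_def]; split <;> simp_all

theorem pvTokenize_delim {cs : List Char} {d : Char} {r : List Char}
    (h : pvStep cs = .delim d r) : pvTokenize cs = [] := by
  rw [pvTokenize.eq_def]; split <;> simp_all

theorem pvTokenize_tok {cs : List Char} {t : PvTok} {r : List Char}
    (h : pvStep cs = .tok t r) : pvTokenize cs = t :: pvTokenize r := by
  rw [pvTokenize.eq_def]; split <;> simp_all

theorem pvRestOf_done {cs : List Char} (h : pvStep cs = .done) : pvRestOf cs = [] := by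
  rw [pvRestOf.eq_def]; split <;> simp_all

theorem pvRestOf_delim {cs : List Char} {d : Char} {r : List Char}
    (h : pvStep cs = .delim d r) : pvRestOf cs = d :: r := by
  rw [pvRestOf.eq_def]; split <;> simp_all

theorem pvRestOf_tok {cs : List Char} {t : PvTok} {r : List Char}
    (h : pvStep cs = .tok t r) : pvRestOf cs = pvRestOf r := by
  rw [pvRestOf.eq_def]; split <;> simp_all

-- ---- the scan invariant (loop state = rendered prefix + pending fragment tokens) ----

theorem pvScan_eq (cs : List Char) :
    ∀ (toks : List PvTok) (s1 s2 : Bool),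
      pvScan cs toks s1 s2
        = pvRender (toks ++ pvTokenize cs)
            ((s1 || pvHas1 (pvTokenize cs)) != (s2 || pvHas2 (pvTokenize cs)))
          ++ pvTail (pvRestOf cs) := by
  suffices H : ∀ (n : Nat) (cs : List Char), cs.length ≤ n → ∀ (toks : List PvTok) (s1 s2 : Bool),
      pvScan cs toks s1 s2
        = pvRender (toks ++ pvTokenize cs)
            ((s1 || pvHas1 (pvTokenize cs)) != (s2 || pvHas2 (pvTokenize cs)))
          ++ pvTail (pvRestOf cs) by
    exact H cs.length cs le_rfl
  intro n
  induction n with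
  | zero =>
    intro cs hn toks s1 s2
    have : cs = [] := by cases cs <;> simp_all
    subst this
    rw [pvScan_done rfl, pvTokenize_done rfl, pvRestOf_done rfl]
    simp [pvTail, pvHas1, pvHas2]
  | succ n ih =>
    intro cs hn toks s1 s2
    cases hs : pvStep cs with
    | done =>
      rw [pvScan_done hs, pvTokenize_done hs, pvRestOf_done hs]
      simp [pvTail, pvHas1, pvHas2]
    | delim d r =>
      rw [pvScan_delim hs, pvTokenize_delim hs, pvRestOf_delim hs]
      simp [pvTail, pvHas1, pvHas2]
    | tok t r =>
      rw [pvScan_tok hs, pvTokenize_tok hs, pvRestOf_tok hs]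
      rw [ih r (by have := pvStep_tok_length hs; omega)]
      simp [pvHas1, pvHas2, Bool.or_assoc]

-- ---- tokenize/restOf vs takeWhile/dropWhile ----

theorem pv_delim_chars : pvNonDelim '[' = true ∧ pvNonDelim '1' = true ∧
    pvNonDelim '2' = true ∧ pvNonDelim '*' = true ∧ pvNonDelim ']' = true := by
  decide

-- a 4-char match survives replacing the tail by its pvNonDelim-takeWhile
theorem pv_take4_takeWhile {ch a b c d : Char} {r : List Char}
    (h : (ch :: r.takeWhile pvNonDelim).take 4 = [a, b, c, d]) :
    (ch :: r).take 4 = [a, b, c, d] := by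
  obtain ⟨r', hr'⟩ := pv_take4_iff.mp h
  obtain ⟨e1, e2⟩ : ch = a ∧ r.takeWhile pvNonDelim = b :: c :: d :: r' := by
    injection hr' with e1 e2; exact ⟨e1, e2⟩
  obtain ⟨t2, ht2⟩ := List.takeWhile_prefix (l := r) pvNonDelim
  rw [e2] at ht2
  rw [← ht2, e1]
  exact pv_take4_cons _ _ _ _ _

theorem pv_tok_rest (cs : List Char) :
    pvTokenize cs = pvTokenize (cs.takeWhile pvNonDelim) ∧
      pvRestOf cs = cs.dropWhile pvNonDelim := by
  suffices H : ∀ (n : Nat) (cs : List Char), cs.length ≤ n →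
      pvTokenize cs = pvTokenize (cs.takeWhile pvNonDelim) ∧
        pvRestOf cs = cs.dropWhile pvNonDelim by
    exact H cs.length cs le_rfl
  intro n
  induction n with
  | zero =>
    intro cs hn
    have : cs = [] := by cases cs <;> simp_all
    subst this
    simp only [List.takeWhile_nil, List.dropWhile_nil]
    exact ⟨by simp, by rw [pvRestOf_done rfl]⟩
  | succ n ih =>
    intro cs hn
    cases hs : pvStep cs with
    | done =>
      rw [pvStep_done_iff] at hs
      subst hs
      simp only [List.takeWhile_nil, List.dropWhile_nil]
      exact ⟨by simp, by rw [pvRestOf_done rfl]⟩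
    | delim d r =>
      obtain ⟨rfl, hd⟩ := pvStep_delim_spec hs
      rw [pvTokenize_delim hs, pvRestOf_delim hs]
      rw [List.takeWhile_cons_of_neg (by simp [hd]), List.dropWhile_cons_of_neg (by simp [hd])]
      exact ⟨(pvTokenize_done rfl).symm, rfl⟩
    | tok t r =>
      have hlt := pvStep_tok_length hs
      obtain ⟨ihtok, ihrest⟩ := ih r (by omega)
      cases t with
      | m v =>
        obtain ⟨hcs, hv⟩ := pvStep_tok_m_spec hs
        subst hcs
        have hnv : pvNonDelim v = true := by rcases hv with rfl | rfl <;> decide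
        have htw : ('[' :: v :: '*' :: ']' :: r).takeWhile pvNonDelim
            = '[' :: v :: '*' :: ']' :: r.takeWhile pvNonDelim := by
          simp [List.takeWhile_cons, hnv, pv_delim_chars.1, pv_delim_chars.2.2.2.1,
            pv_delim_chars.2.2.2.2]
        have hdw : ('[' :: v :: '*' :: ']' :: r).dropWhile pvNonDelim
            = r.dropWhile pvNonDelim := by
          simp [List.dropWhile_cons, hnv, pv_delim_chars.1, pv_delim_chars.2.2.2.1,
            pv_delim_chars.2.2.2.2]
        have hstep2 : pvStep ('[' :: v :: '*' :: ']' :: r.takeWhile pvNonDelim)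
            = .tok (.m v) (r.takeWhile pvNonDelim) := by
          rcases hv with rfl | rfl <;>
            simp [pvStep, pv_take4_cons]
        rw [pvTokenize_tok hs, pvRestOf_tok hs, htw, hdw, pvTokenize_tok hstep2]
        exact ⟨by rw [ihtok], ihrest⟩
      | c ch =>
        obtain ⟨hcs, hch, hne1, hne2⟩ := pvStep_tok_c_spec hs
        subst hcs
        have htw : (ch :: r).takeWhile pvNonDelim = ch :: r.takeWhile pvNonDelim :=
          List.takeWhile_cons_of_pos hch
        have hdw : (ch :: r).dropWhile pvNonDelim = r.dropWhile pvNonDelim :=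
          List.dropWhile_cons_of_pos hch
        have hstep2 : pvStep (ch :: r.takeWhile pvNonDelim)
            = .tok (.c ch) (r.takeWhile pvNonDelim) := by
          have hchd : ¬ (ch = '.' ∨ ch = '^') := by
            intro hc
            rcases hc with rfl | rfl <;> simp [pvNonDelim] at hch
          simp only [pvStep]
          rw [if_neg hchd, if_neg (fun hh => hne1 (pv_take4_takeWhile hh)),
            if_neg (fun hh => hne2 (pv_take4_takeWhile hh))]
        rw [pvTokenize_tok hs, pvRestOf_tok hs, htw, hdw, pvTokenize_tok hstep2]
        exact ⟨by rw [ihtok], ihrest⟩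

-- ---- per-fragment facts (fragment = delimiter-free) ----

theorem pv_isIn_decide (sub s : List Char) :
    PySem.Chars.isIn sub s = decide (sub <:+: s) := by
  by_cases h : sub <:+: s
  · simp [h, (PySem.Chars.isIn_iff_infix sub s).mpr h]
  · simp only [h, decide_false]
    rw [← Bool.not_eq_true, PySem.Chars.isIn_iff_infix]
    exact h

theorem pvHas1_cons (t : PvTok) (toks : List PvTok) :
    pvHas1 (t :: toks) = ((t == PvTok.m '1') || pvHas1 toks) := by simp [pvHas1]

theorem pvHas2_cons (t : PvTok) (toks : List PvTok) :
    pvHas2 (t :: toks) = ((t == PvTok.m '2') || pvHas2 toks) := by simp [pvHas2]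

theorem pv_isIn1 (f : List Char) (hf : ∀ c ∈ f, pvNonDelim c = true) :
    PySem.Chars.isIn ['[','1','*',']'] f = pvHas1 (pvTokenize f) := by
  suffices H : ∀ (n : Nat) (f : List Char), f.length ≤ n → (∀ c ∈ f, pvNonDelim c = true) →
      PySem.Chars.isIn ['[','1','*',']'] f = pvHas1 (pvTokenize f) from H f.length f le_rfl hf
  intro n
  induction n with
  | zero =>
    intro f hn hf
    have : f = [] := by cases f <;> simp_all
    subst this
    rw [pvTokenize_done rfl]
    decide
  | succ n ih =>
    intro f hn hf
    cases hs : pvStep f with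
    | done =>
      rw [pvStep_done_iff] at hs; subst hs
      rw [pvTokenize_done rfl]; decide
    | delim d r =>
      obtain ⟨hcs, hd⟩ := pvStep_delim_spec hs
      exact absurd (hf d (by rw [hcs]; exact List.mem_cons_self ..)) (by simp [hd])
    | tok t r =>
      have hlt := pvStep_tok_length hs
      rw [pvTokenize_tok hs, pv_isIn_decide]
      cases t with
      | m v =>
        obtain ⟨hcs, hv⟩ := pvStep_tok_m_spec hs
        have hfr : ∀ c ∈ r, pvNonDelim c = true := fun c hc => hf c (by rw [hcs]; simp [hc])
        rcases hv with rfl | rfl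
        · have hinf : ['[','1','*',']'] <:+: f := by
            rw [hcs]; exact (List.prefix_append _ _).isInfix
          simp [hinf, pvHas1_cons]
        · have hiff : (['[','1','*',']'] <:+: f) ↔ (['[','1','*',']'] <:+: r) := by
            rw [hcs]
            simp [List.infix_cons_iff, List.cons_prefix_cons]
          rw [decide_eq_decide.mpr hiff, ← pv_isIn_decide, ih r (by omega) hfr]
          simp [pvHas1_cons]
      | c ch =>
        obtain ⟨hcs, hch, hne1, hne2⟩ := pvStep_tok_c_spec hs
        have hfr : ∀ c ∈ r, pvNonDelim c = true := fun c hc => hf c (by rw [hcs]; simp [hc])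
        have hnp : ¬ (['[','1','*',']'] <+: f) := by
          intro hp
          exact hne1 (by simpa using (List.prefix_iff_eq_take.mp hp).symm)
        have hiff : (['[','1','*',']'] <:+: f) ↔ (['[','1','*',']'] <:+: r) := by
          rw [hcs] at hnp ⊢
          rw [List.infix_cons_iff]
          simp [hnp]
        rw [decide_eq_decide.mpr hiff, ← pv_isIn_decide, ih r (by omega) hfr]
        simp [pvHas1_cons]

theorem pv_isIn2 (f : List Char) (hf : ∀ c ∈ f, pvNonDelim c = true) :
    PySem.Chars.isIn ['[','2','*',']'] f = pvHas2 (pvTokenize f) := by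
  suffices H : ∀ (n : Nat) (f : List Char), f.length ≤ n → (∀ c ∈ f, pvNonDelim c = true) →
      PySem.Chars.isIn ['[','2','*',']'] f = pvHas2 (pvTokenize f) from H f.length f le_rfl hf
  intro n
  induction n with
  | zero =>
    intro f hn hf
    have : f = [] := by cases f <;> simp_all
    subst this
    rw [pvTokenize_done rfl]
    decide
  | succ n ih =>
    intro f hn hf
    cases hs : pvStep f with
    | done =>
      rw [pvStep_done_iff] at hs; subst hs
      rw [pvTokenize_done rfl]; decide
    | delim d r =>
      obtain ⟨hcs, hd⟩ := pvStep_delim_spec hs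
      exact absurd (hf d (by rw [hcs]; exact List.mem_cons_self ..)) (by simp [hd])
    | tok t r =>
      have hlt := pvStep_tok_length hs
      rw [pvTokenize_tok hs, pv_isIn_decide]
      cases t with
      | m v =>
        obtain ⟨hcs, hv⟩ := pvStep_tok_m_spec hs
        have hfr : ∀ c ∈ r, pvNonDelim c = true := fun c hc => hf c (by rw [hcs]; simp [hc])
        rcases hv with rfl | rfl
        · have hiff : (['[','2','*',']'] <:+: f) ↔ (['[','2','*',']'] <:+: r) := by
            rw [hcs]
            simp [List.infix_cons_iff, List.cons_prefix_cons]
          rw [decide_eq_decide.mpr hiff, ← pv_isIn_decide, ih r (by omega) hfr]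
          simp [pvHas2_cons]
        · have hinf : ['[','2','*',']'] <:+: f := by
            rw [hcs]; exact (List.prefix_append _ _).isInfix
          simp [hinf, pvHas2_cons]
      | c ch =>
        obtain ⟨hcs, hch, hne1, hne2⟩ := pvStep_tok_c_spec hs
        have hfr : ∀ c ∈ r, pvNonDelim c = true := fun c hc => hf c (by rw [hcs]; simp [hc])
        have hnp : ¬ (['[','2','*',']'] <+: f) := by
          intro hp
          exact hne2 (by simpa using (List.prefix_iff_eq_take.mp hp).symm)
        have hiff : (['[','2','*',']'] <:+: f) ↔ (['[','2','*',']'] <:+: r) := by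
          rw [hcs] at hnp ⊢
          rw [List.infix_cons_iff]
          simp [hnp]
        rw [decide_eq_decide.mpr hiff, ← pv_isIn_decide, ih r (by omega) hfr]
        simp [pvHas2_cons]

theorem pv_render_false (f : List Char) (hf : ∀ c ∈ f, pvNonDelim c = true) :
    pvRender (pvTokenize f) false = f := by
  suffices H : ∀ (n : Nat) (f : List Char), f.length ≤ n → (∀ c ∈ f, pvNonDelim c = true) →
      pvRender (pvTokenize f) false = f from H f.length f le_rfl hf
  intro n
  induction n with
  | zero =>
    intro f hn hf
    have : f = [] := by cases f <;> simp_all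
    subst this
    rw [pvTokenize_done rfl]
    rfl
  | succ n ih =>
    intro f hn hf
    cases hs : pvStep f with
    | done =>
      rw [pvStep_done_iff] at hs; subst hs
      rw [pvTokenize_done rfl]; rfl
    | delim d r =>
      obtain ⟨hcs, hd⟩ := pvStep_delim_spec hs
      exact absurd (hf d (by rw [hcs]; exact List.mem_cons_self ..)) (by simp [hd])
    | tok t r =>
      have hlt := pvStep_tok_length hs
      rw [pvTokenize_tok hs]
      cases t with
      | m v =>
        obtain ⟨hcs, hv⟩ := pvStep_tok_m_spec hs
        have hfr : ∀ c ∈ r, pvNonDelim c = true := fun c hc => hf c (by rw [hcs]; simp [hc])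
        have ihr := ih r (by omega) hfr
        rw [hcs]
        simp only [pvRender, List.flatMap_cons] at ihr ⊢
        simp at ihr
        simp [ihr]
      | c ch =>
        obtain ⟨hcs, hch, hne1, hne2⟩ := pvStep_tok_c_spec hs
        have hfr : ∀ c ∈ r, pvNonDelim c = true := fun c hc => hf c (by rw [hcs]; simp [hc])
        have ihr := ih r (by omega) hfr
        rw [hcs]
        simp only [pvRender, List.flatMap_cons] at ihr ⊢
        simp at ihr
        simp [ihr]

theorem pv_rep1 (f : List Char) (hf : ∀ c ∈ f, pvNonDelim c = true)
    (h2 : pvHas2 (pvTokenize f) = false) :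
    pvRep '[' ['1','*',']'] ['[','3','*',']'] f = pvRender (pvTokenize f) true := by
  suffices H : ∀ (n : Nat) (f : List Char), f.length ≤ n → (∀ c ∈ f, pvNonDelim c = true) →
      pvHas2 (pvTokenize f) = false →
      pvRep '[' ['1','*',']'] ['[','3','*',']'] f = pvRender (pvTokenize f) true from
    H f.length f le_rfl hf h2
  intro n
  induction n with
  | zero =>
    intro f hn hf h2
    have : f = [] := by cases f <;> simp_all
    subst this
    rw [pvTokenize_done rfl, pvRep]
    rfl
  | succ n ih =>
    intro f hn hf h2
    cases hs : pvStep f with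
    | done =>
      rw [pvStep_done_iff] at hs; subst hs
      rw [pvTokenize_done rfl, pvRep]; rfl
    | delim d r =>
      obtain ⟨hcs, hd⟩ := pvStep_delim_spec hs
      exact absurd (hf d (by rw [hcs]; exact List.mem_cons_self ..)) (by simp [hd])
    | tok t r =>
      have hlt := pvStep_tok_length hs
      rw [pvTokenize_tok hs] at h2 ⊢
      cases t with
      | m v =>
        obtain ⟨hcs, hv⟩ := pvStep_tok_m_spec hs
        have hfr : ∀ c ∈ r, pvNonDelim c = true := fun c hc => hf c (by rw [hcs]; simp [hc])
        rw [pvHas2_cons] at h2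
        rcases hv with rfl | rfl
        · have h2r : pvHas2 (pvTokenize r) = false := by simpa using h2
          have hpre : (('[' : Char) :: ['1','*',']']).isPrefixOf f = true := by
            rw [List.isPrefixOf_iff_prefix, hcs]; exact ⟨r, rfl⟩
          rw [hcs] at hpre ⊢
          rw [pvRep, if_pos hpre]
          have ihr := ih r (by omega) hfr h2r
          simp only [pvRender, List.flatMap_cons] at ihr ⊢
          simp at ihr
          simp [ihr]
        · simp at h2
      | c ch =>
        obtain ⟨hcs, hch, hne1, hne2⟩ := pvStep_tok_c_spec hs
        have hfr : ∀ c ∈ r, pvNonDelim c = true := fun c hc => hf c (by rw [hcs]; simp [hc])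
        have h2r : pvHas2 (pvTokenize r) = false := by
          rw [pvHas2_cons] at h2; simpa using h2
        have hnp : ¬ (['[','1','*',']'] <+: f) := by
          intro hp
          exact hne1 (by simpa using (List.prefix_iff_eq_take.mp hp).symm)
        have hpre : (('[' : Char) :: ['1','*',']']).isPrefixOf f = false := by
          rw [← Bool.not_eq_true, List.isPrefixOf_iff_prefix]; exact hnp
        rw [hcs] at hpre ⊢
        rw [pvRep]
        simp only [hpre, Bool.false_eq_true, if_false]
        have ihr := ih r (by omega) hfr h2r
        simp only [pvRender, List.flatMap_cons] at ihr ⊢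
        simp at ihr
        simp [ihr]

theorem pv_rep2 (f : List Char) (hf : ∀ c ∈ f, pvNonDelim c = true)
    (h1 : pvHas1 (pvTokenize f) = false) :
    pvRep '[' ['2','*',']'] ['[','3','*',']'] f = pvRender (pvTokenize f) true := by
  suffices H : ∀ (n : Nat) (f : List Char), f.length ≤ n → (∀ c ∈ f, pvNonDelim c = true) →
      pvHas1 (pvTokenize f) = false →
      pvRep '[' ['2','*',']'] ['[','3','*',']'] f = pvRender (pvTokenize f) true from
    H f.length f le_rfl hf h1
  intro n
  induction n with
  | zero =>
    intro f hn hf h1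
    have : f = [] := by cases f <;> simp_all
    subst this
    rw [pvTokenize_done rfl, pvRep]
    rfl
  | succ n ih =>
    intro f hn hf h1
    cases hs : pvStep f with
    | done =>
      rw [pvStep_done_iff] at hs; subst hs
      rw [pvTokenize_done rfl, pvRep]; rfl
    | delim d r =>
      obtain ⟨hcs, hd⟩ := pvStep_delim_spec hs
      exact absurd (hf d (by rw [hcs]; exact List.mem_cons_self ..)) (by simp [hd])
    | tok t r =>
      have hlt := pvStep_tok_length hs
      rw [pvTokenize_tok hs] at h1 ⊢
      cases t with
      | m v =>
        obtain ⟨hcs, hv⟩ := pvStep_tok_m_spec hs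
        have hfr : ∀ c ∈ r, pvNonDelim c = true := fun c hc => hf c (by rw [hcs]; simp [hc])
        rw [pvHas1_cons] at h1
        rcases hv with rfl | rfl
        · simp at h1
        · have h1r : pvHas1 (pvTokenize r) = false := by simpa using h1
          have hpre : (('[' : Char) :: ['2','*',']']).isPrefixOf f = true := by
            rw [List.isPrefixOf_iff_prefix, hcs]; exact ⟨r, rfl⟩
          rw [hcs] at hpre ⊢
          rw [pvRep, if_pos hpre]
          have ihr := ih r (by omega) hfr h1r
          simp only [pvRender, List.flatMap_cons] at ihr ⊢
          simp at ihr
          simp [ihr]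
      | c ch =>
        obtain ⟨hcs, hch, hne1, hne2⟩ := pvStep_tok_c_spec hs
        have hfr : ∀ c ∈ r, pvNonDelim c = true := fun c hc => hf c (by rw [hcs]; simp [hc])
        have h1r : pvHas1 (pvTokenize r) = false := by
          rw [pvHas1_cons] at h1; simpa using h1
        have hnp : ¬ (['[','2','*',']'] <+: f) := by
          intro hp
          exact hne2 (by simpa using (List.prefix_iff_eq_take.mp hp).symm)
        have hpre : (('[' : Char) :: ['2','*',']']).isPrefixOf f = false := by
          rw [← Bool.not_eq_true, List.isPrefixOf_iff_prefix]; exact hnp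
        rw [hcs] at hpre ⊢
        rw [pvRep]
        simp only [hpre, Bool.false_eq_true, if_false]
        have ihr := ih r (by omega) hfr h1r
        simp only [pvRender, List.flatMap_cons] at ihr ⊢
        simp at ihr
        simp [ihr]

theorem pv_frag (f : List Char) (hf : ∀ c ∈ f, pvNonDelim c = true) :
    pvFixA f = pvRender (pvTokenize f) (pvHas1 (pvTokenize f) != pvHas2 (pvTokenize f)) := by
  have e1 := pv_isIn1 f hf
  have e2 := pv_isIn2 f hf
  unfold pvFixA
  rw [e1, e2]
  cases h1 : pvHas1 (pvTokenize f) <;> cases h2 : pvHas2 (pvTokenize f)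
  · simp only [Bool.not_false, Bool.and_self, Bool.false_and, Bool.and_false, if_false,
      Bool.false_eq_true, bne_self_eq_false]
    exact (pv_render_false f hf).symm
  · simp only [Bool.not_true, Bool.false_and, Bool.and_false, Bool.not_false, Bool.true_and,
      Bool.false_eq_true, if_false, if_true, bne]
    rw [pv_replace]
    exact pv_rep2 f hf h1
  · simp only [Bool.not_false, Bool.and_true, Bool.true_and, Bool.not_true, Bool.and_false,
      Bool.false_eq_true, if_true, bne]
    rw [pv_replace]
    exact pv_rep1 f hf h2
  · simp only [Bool.not_true, Bool.and_false, Bool.false_and, Bool.false_eq_true, if_false,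
      bne_self_eq_false]
    exact (pv_render_false f hf).symm

-- ---- splitting structure of A's side ----

theorem pv_sos_cons (d : Char) (l : List Char) : ∃ p ps, pvSos d l = p :: ps := by
  cases hx : pvSos d l with
  | nil => exact absurd hx (pvSos_ne_nil' d l)
  | cons p ps => exact ⟨p, ps, rfl⟩

theorem pvSos_prepend (d : Char) (f r : List Char) (p : List Char) (ps : List (List Char))
    (hr : pvSos d r = p :: ps) (hf : ∀ c ∈ f, c ≠ d) :
    pvSos d (f ++ r) = (f ++ p) :: ps := by
  induction f with
  | nil => simpa using hr
  | cons c f' ih =>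
    have hc : ¬ c = d := hf c (List.mem_cons_self ..)
    have ih' := ih (fun x hx => hf x (List.mem_cons_of_mem _ hx))
    simp only [List.cons_append, pvSos, if_neg hc, ih', List.modifyHead_cons]

theorem pv_nd_dot {f : List Char} (hf : ∀ c ∈ f, pvNonDelim c = true) :
    ∀ c ∈ f, c ≠ '.' := by
  intro c hc e
  subst e
  exact absurd (hf _ hc) (by decide)

theorem pv_nd_hat {f : List Char} (hf : ∀ c ∈ f, pvNonDelim c = true) :
    ∀ c ∈ f, c ≠ '^' := by
  intro c hc e
  subst e
  exact absurd (hf _ hc) (by decide)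

theorem pv_join_append_head (sep X Y : List Char) (l : List (List Char)) :
    PySem.Chars.join sep ((X ++ Y) :: l) = X ++ PySem.Chars.join sep (Y :: l) := by
  cases l with
  | nil => simp [PySem.Chars.join_singleton]
  | cons z zs =>
    rw [PySem.Chars.join_cons_cons, PySem.Chars.join_cons_cons]
    simp [List.append_assoc]

theorem pvA1_frag (f : List Char) (hf : ∀ c ∈ f, pvNonDelim c = true) :
    pvA1 f = pvFixA f := by
  have h1 : pvSos '.' f = [f] := by
    have := pvSos_prepend '.' f [] [] [] rfl (pv_nd_dot hf)
    simpa using this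
  have h2 : pvSos '^' f = [f] := by
    have := pvSos_prepend '^' f [] [] [] rfl (pv_nd_hat hf)
    simpa using this
  unfold pvA1
  rw [h1]
  simp only [List.map_cons, List.map_nil]
  rw [PySem.Chars.join_singleton, h2]
  simp only [List.map_cons, List.map_nil]
  rw [PySem.Chars.join_singleton]

theorem pvA1_delim (f : List Char) (d : Char) (r : List Char)
    (hf : ∀ c ∈ f, pvNonDelim c = true) (hd : pvNonDelim d = false) :
    pvA1 (f ++ d :: r) = pvFixA f ++ d :: pvA1 r := by
  have hd' : d = '.' ∨ d = '^' := by
    by_cases e1 : d = '.'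
    · exact Or.inl e1
    · by_cases e2 : d = '^'
      · exact Or.inr e2
      · exact absurd hd (by simp [pvNonDelim, e1, e2])
  have hdotf := pv_nd_dot hf
  have hhatf := pv_nd_hat hf
  have h2f : pvSos '^' f = [f] := by
    have := pvSos_prepend '^' f [] [] [] rfl hhatf
    simpa using this
  obtain ⟨p, ps, hr⟩ := pv_sos_cons '.' r
  rcases hd' with rfl | rfl
  · have hsr : pvSos '.' ('.' :: r) = [] :: p :: ps := by
      simp [pvSos, hr]
    have hmain := pvSos_prepend '.' f ('.' :: r) [] (p :: ps) hsr hdotf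
    unfold pvA1
    rw [hmain, hr]
    simp only [List.map_cons, List.append_nil]
    rw [PySem.Chars.join_cons_cons, h2f]
    simp only [List.map_cons, List.map_nil]
    rw [PySem.Chars.join_singleton]
    simp [List.append_assoc]
  · obtain ⟨q, qs, hq⟩ := pv_sos_cons '^' p
    have hsr : pvSos '.' ('^' :: r) = ('^' :: p) :: ps := by
      simp [pvSos, hr]
    have hmain := pvSos_prepend '.' f ('^' :: r) ('^' :: p) ps hsr hdotf
    unfold pvA1
    rw [hmain, hr]
    simp only [List.map_cons]
    have hsos : pvSos '^' (f ++ '^' :: p) = f :: q :: qs := by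
      have h1 : pvSos '^' ('^' :: p) = [] :: q :: qs := by
        simp [pvSos, hq]
      have := pvSos_prepend '^' f ('^' :: p) [] (q :: qs) h1 hhatf
      simpa using this
    rw [hsos, hq]
    simp only [List.map_cons]
    rw [PySem.Chars.join_cons_cons]
    rw [List.append_assoc]
    rw [pv_join_append_head ['.'] (pvFixA f) _ _]
    rw [pv_join_append_head ['.'] ['^'] _ _]
    simp [List.append_assoc]

-- ---- per-string equivalence and assembly ----

theorem pv_dropWhile_head {p : Char → Bool} : ∀ {l : List Char} {d : Char} {r : List Char},
    l.dropWhile p = d :: r → p d = false := by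
  intro l
  induction l with
  | nil => intro d r h; simp at h
  | cons c t ih =>
    intro d r h
    rw [List.dropWhile_cons] at h
    split_ifs at h with hc
    · exact ih h
    · obtain ⟨e1, e2⟩ : c = d ∧ t = r := by injection h with a b; exact ⟨a, b⟩
      subst e1
      simpa using hc

theorem pv_main (cs : List Char) : pvScan cs [] false false = pvA1 cs := by
  suffices H : ∀ (n : Nat) (cs : List Char), cs.length < n → pvScan cs [] false false = pvA1 cs by
    exact H (cs.length + 1) cs (by omega)
  intro n
  induction n using Nat.strong_induction_on with
  | _ n ih =>
    intro cs hn
    obtain ⟨htok, hrest⟩ := pv_tok_rest cs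
    rw [pvScan_eq cs [] false false, htok, hrest]
    have hf : ∀ c ∈ cs.takeWhile pvNonDelim, pvNonDelim c = true :=
      fun c hc => List.mem_takeWhile_imp hc
    cases hdrop : cs.dropWhile pvNonDelim with
    | nil =>
      have hall : ∀ c ∈ cs, pvNonDelim c = true := by
        intro c hc
        have := List.takeWhile_append_dropWhile (p := pvNonDelim) (l := cs)
        rw [hdrop] at this
        simp only [List.append_nil] at this
        exact List.mem_takeWhile_imp (this ▸ hc)
      have htws : cs.takeWhile pvNonDelim = cs := by
        have := List.takeWhile_append_dropWhile (p := pvNonDelim) (l := cs)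
        rw [hdrop] at this
        simpa using this
      rw [htws]
      simp only [pvTail, List.append_nil, List.nil_append]
      rw [pvA1_frag cs hall, pv_frag cs hall]
      simp
    | cons d r' =>
      have hd : pvNonDelim d = false := pv_dropWhile_head hdrop
      have hcs : cs = cs.takeWhile pvNonDelim ++ d :: r' := by
        conv_lhs => rw [← List.takeWhile_append_dropWhile (p := pvNonDelim) (l := cs)]
        rw [hdrop]
      have hlen : r'.length < cs.length := by
        have := congrArg List.length hcs
        simp at this
        omega
      simp only [pvTail]
      rw [ih cs.length hn r' hlen]
      conv_rhs => rw [hcs]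
      rw [pvA1_delim _ d r' hf hd, pv_frag _ hf]
      simp

def pvFixAStr (m : String) : String :=
  if PySem.Str.isIn "[1*]" m && !(PySem.Str.isIn "[2*]" m) then PySem.Str.replace m "[1*]" "[3*]"
  else if !(PySem.Str.isIn "[1*]" m) && PySem.Str.isIn "[2*]" m then PySem.Str.replace m "[2*]" "[3*]"
  else m

theorem pv_fixAStr (m : List Char) : pvFixAStr (String.ofList m) = String.ofList (pvFixA m) := by
  have e1 : ("[1*]" : String).toList = ['[','1','*',']'] := by decide
  have e2 : ("[2*]" : String).toList = ['[','2','*',']'] := by decide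
  have e3 : ("[3*]" : String).toList = ['[','3','*',']'] := by decide
  unfold pvFixAStr pvFixA
  simp only [PySem.Str.isIn_eq, String.toList_ofList, e1, e2]
  split_ifs
  · conv_lhs => rw [← String.ofList_toList (s := PySem.Str.replace (String.ofList m) "[1*]" "[3*]")]
    rw [PySem.Str.toList_replace, String.toList_ofList, e1, e3]
  · conv_lhs => rw [← String.ofList_toList (s := PySem.Str.replace (String.ofList m) "[2*]" "[3*]")]
    rw [PySem.Str.toList_replace, String.toList_ofList, e2, e3]
  · rfl

theorem pv_split_single (s : String) (d : Char) (ds : String) (hds : ds.toList = [d]) :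
    (PySem.Str.split? s ds).getD [] = (pvSos d s.toList).map String.ofList := by
  unfold PySem.Str.split?
  simp [PySem.Chars.split?, hds, pv_splitOn]

theorem pv_joinStr (sepS : String) (sep : List Char) (hsep : sepS.toList = sep)
    (l : List (List Char)) :
    PySem.Str.join sepS (l.map String.ofList) = String.ofList (PySem.Chars.join sep l) := by
  conv_lhs => rw [← String.ofList_toList (s := PySem.Str.join sepS (l.map String.ofList))]
  rw [PySem.Str.toList_join, hsep, List.map_map]
  congr 1
  simp [Function.comp_def]

theorem pv_portA (mol_list : List String) :
    replace_ends mol_list = mol_list.map (fun mol => String.ofList (pvA1 mol.toList)) := by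
  unfold replace_ends
  have hb : ∀ (acc : List String) (m : String),
      (if PySem.Str.isIn "[1*]" m && !(PySem.Str.isIn "[2*]" m) then
        acc ++ [PySem.Str.replace m "[1*]" "[3*]"]
      else if !(PySem.Str.isIn "[1*]" m) && PySem.Str.isIn "[2*]" m then
        acc ++ [PySem.Str.replace m "[2*]" "[3*]"]
      else acc ++ [m]) = acc ++ [pvFixAStr m] := by
    intro acc m
    unfold pvFixAStr
    split_ifs <;> rfl
  simp only [hb, PySem.List.foldl_append_singleton_eq_map, List.nil_append]
  refine List.map_congr_left fun mol _ => ?_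
  rw [pv_split_single mol '.' "." (by decide), List.map_map]
  have hinner : ((fun mo => PySem.Str.join "^"
        (List.map pvFixAStr ((PySem.Str.split? mo "^").getD []))) ∘ String.ofList)
      = fun cs0 => String.ofList (PySem.Chars.join ['^'] ((pvSos '^' cs0).map pvFixA)) := by
    funext cs0
    simp only [Function.comp_apply]
    rw [pv_split_single (String.ofList cs0) '^' "^" (by decide), String.toList_ofList,
      List.map_map]
    rw [show (pvFixAStr ∘ String.ofList) = (String.ofList ∘ pvFixA) from funext pv_fixAStr]
    rw [← List.map_map]
    rw [pv_joinStr "^" ['^'] (by decide)]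
  rw [hinner]
  rw [show (fun cs0 => String.ofList (PySem.Chars.join ['^'] ((pvSos '^' cs0).map pvFixA)))
      = (String.ofList ∘ fun cs0 => PySem.Chars.join ['^'] ((pvSos '^' cs0).map pvFixA)) from rfl]
  rw [← List.map_map]
  rw [pv_joinStr "." ['.'] (by decide)]
  rfl

-- ===== VERDICT (by name: the statement is the Claim_ definition above) =====
theorem replace_ends_spec : Claim_equal_replace_ends := by
  intro mol_list _
  unfold Spec_replace_ends replace_ends_alt
  rw [pv_portA, PySem.List.foldl_append_singleton_eq_map]
  simp [pv_main]
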